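-- pv_equiv track=rewrite | github.com/MrBrantCode/unitest_baseline | mut_generate/mist_train_cf/cf_25580/solution.py | generate_subsets
-- ===== SOURCE A (Python) =====
-- def generate_subsets(s):
--     if len(s) == 0:
--         return ['']
--     else:
--         results = list()
--         for subset in generate_subsets(s[1:]):
--             results.append(subset)
--             results.append(s[0] + subset)
--         return results
-- ===== SOURCE B (Python) =====
-- def generate_subsets(s):
--     result = ['']
--     for ch in reversed(s):
--         result = [p for sub in result for p in (sub, ch + sub)]
--     return result
-- ===== Notes on version B (the rewrite author's own statement) =====
-- stated objective: alternative
-- what changed: Replaces the recursion-with-inner-append-loop by an iterative doubling pass: start from [''] and fold over the characters in reverse, rebuilding the list with a flat comprehension (subset, ch+subset) each step.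
import Mathlib
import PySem

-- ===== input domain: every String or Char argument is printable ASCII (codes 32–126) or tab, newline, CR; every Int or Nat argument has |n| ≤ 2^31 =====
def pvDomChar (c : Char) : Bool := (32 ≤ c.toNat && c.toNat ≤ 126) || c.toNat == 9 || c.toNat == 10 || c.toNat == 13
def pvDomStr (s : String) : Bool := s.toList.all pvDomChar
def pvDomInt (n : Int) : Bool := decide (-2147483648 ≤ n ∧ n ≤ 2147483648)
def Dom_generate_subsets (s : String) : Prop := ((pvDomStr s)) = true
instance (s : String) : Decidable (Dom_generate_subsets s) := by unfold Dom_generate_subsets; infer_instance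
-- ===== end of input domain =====

-- B: iterative doubling fold over the reversed characters instead of A's recursion with an inner append loop; same cost, different decomposition.
-- ===== PORT A =====
-- A recurses on s[1:]; ported as structural recursion on the character list.
def genSubsetsA : List Char → List String
  | [] => [""]
  | c :: t =>
    -- for subset in generate_subsets(s[1:]): results.append(subset); results.append(s[0] + subset)
    (genSubsetsA t).foldl (fun results subset => results ++ [subset, c.toString ++ subset]) []

def generate_subsets (s : String) : List String := genSubsetsA s.toList

-- ===== PORT B =====
def generate_subsets_alt (s : String) : List String :=
  s.toList.reverse.foldl
    (fun result ch => result.flatMap (fun sub => [sub, ch.toString ++ sub])) [""]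

-- ===== PRECONDITION & SPEC =====
def Spec_generate_subsets (s : String) (out : List String) : Prop := out = generate_subsets_alt s
instance (s : String) (out : List String) : Decidable (Spec_generate_subsets s out) := by unfold Spec_generate_subsets; infer_instance

-- ===== CLAIM (what is proved, stated in full; the proofs are below) =====
def Claim_equal_generate_subsets : Prop := ∀ (s : String), Dom_generate_subsets s → Spec_generate_subsets s (generate_subsets s)

-- ===== LEMMAS AND PROOFS =====

-- ===== VERDICT (by name: the statement is the Claim_ definition above) =====
lemma foldl_append_two {α : Type} (f : α → α) :
    ∀ (l : List α) (acc : List α),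
      l.foldl (fun results subset => results ++ [subset, f subset]) acc
        = acc ++ l.flatMap (fun sub => [sub, f sub]) := by
  intro l
  induction l with
  | nil => intro acc; simp
  | cons x t ih => intro acc; simp [ih]

lemma genSubsetsA_eq_fold :
    ∀ (l : List Char),
      genSubsetsA l
        = l.reverse.foldl
            (fun result ch => result.flatMap (fun sub => [sub, ch.toString ++ sub])) [""] := by
  intro l
  induction l with
  | nil => simp [genSubsetsA]
  | cons c t ih =>
    simp only [genSubsetsA, ih, List.reverse_cons, List.foldl_append, List.foldl_cons, List.foldl_nil, foldl_append_two, List.nil_append]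

theorem generate_subsets_spec : Claim_equal_generate_subsets := by
  intro s _
  unfold Spec_generate_subsets generate_subsets generate_subsets_alt
  exact genSubsetsA_eq_fold s.toList
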